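-- pv_equiv track=rewrite | github.com/kaykay7/ChainReactors5 | agent/agent/supply_chain_optimization.py | _group_shipments_by_region
-- ===== SOURCE A (Python) =====
-- from typing import Dict, List, Any, Optional, Tuple
--
-- def _group_shipments_by_region(logistics_items: List[Dict]) -> Dict[str, List[Dict]]:
--     """Group shipments by destination region"""
--     regional_shipments = {}
--
--     for item in logistics_items:
--         data = item.get("data", {})
--         destination = data.get("field4", "")
--         region = destination.split(",")[-1].strip() if destination else "Unknown"
--
--         if region not in regional_shipments:
--             regional_shipments[region] = []
--         regional_shipments[region].append(item)
--
--     return regional_shipments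
-- ===== SOURCE B (Python) =====
-- def _group_shipments_by_region(logistics_items):
--     def _region(item):
--         data = item.get("data", {})
--         destination = data.get("field4", "")
--         return destination.split(",")[-1].strip() if destination else "Unknown"
--
--     keys = [_region(item) for item in logistics_items]
--     return {r: [item for item, k in zip(logistics_items, keys) if k == r]
--             for r in dict.fromkeys(keys)}
-- ===== Notes on version B (the rewrite author's own statement) =====
-- stated objective: alternative
-- what changed: B replaces A's incremental check-key-then-append dict building with a two-pass scheme: compute each item's region key once, take the keys' first-occurrence dedup via dict.fromkeys, and build each group by filtering the zipped (item, key) list per region.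
import Mathlib
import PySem

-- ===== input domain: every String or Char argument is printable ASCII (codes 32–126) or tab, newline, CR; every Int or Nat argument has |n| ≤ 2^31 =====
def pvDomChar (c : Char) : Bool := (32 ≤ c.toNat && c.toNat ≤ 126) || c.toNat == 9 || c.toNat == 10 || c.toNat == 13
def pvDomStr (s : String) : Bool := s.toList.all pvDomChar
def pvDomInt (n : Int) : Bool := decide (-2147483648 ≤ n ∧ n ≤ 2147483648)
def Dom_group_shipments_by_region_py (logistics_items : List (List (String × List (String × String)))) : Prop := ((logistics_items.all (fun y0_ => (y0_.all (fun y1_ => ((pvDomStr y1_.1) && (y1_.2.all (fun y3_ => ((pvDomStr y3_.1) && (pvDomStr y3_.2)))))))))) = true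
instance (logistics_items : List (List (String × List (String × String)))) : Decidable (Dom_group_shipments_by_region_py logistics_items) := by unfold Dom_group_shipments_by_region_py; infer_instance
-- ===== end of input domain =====

-- B groups in two passes — dedup of region keys in first-occurrence order, then one filter per region —
-- instead of A's incremental dict building; objective: alternative decomposition, same results.


-- ===== PORT A =====
-- A: one pass, building the dict incrementally (check-if-key-present, then append).
def group_shipments_by_region_py (logistics_items : List (List (String × List (String × String)))) : List (String × List (List (String × List (String × String)))) :=
  (logistics_items.foldl (fun regional_shipments item =>
      let data := PySem.Dict.getD (PySem.Dict.mk item) "data" []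
      let destination := PySem.Dict.getD (PySem.Dict.mk data) "field4" ""
      let region := if destination ≠ "" then
          PySem.Str.strip (PySem.List.pyGetD ((PySem.Str.split? destination ",").getD []) (-1) "")
        else "Unknown"
      let regional_shipments :=
        if regional_shipments.contains region then regional_shipments
        else regional_shipments.insert region []
      regional_shipments.modify region [] (fun l => l ++ [item]))
    PySem.Dict.empty).items

-- ===== PORT B =====
-- B's helper _region(item)
def pvRegion (item : List (String × List (String × String))) : String :=
  let data := PySem.Dict.getD (PySem.Dict.mk item) "data" []
  let destination := PySem.Dict.getD (PySem.Dict.mk data) "field4" ""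
  if destination ≠ "" then
    PySem.Str.strip (PySem.List.pyGetD ((PySem.Str.split? destination ",").getD []) (-1) "")
  else "Unknown"

def group_shipments_by_region_py_alt (logistics_items : List (List (String × List (String × String)))) : List (String × List (List (String × List (String × String)))) :=
  let keys := logistics_items.map pvRegion
  (PySem.List.dedup keys).map (fun r =>
    (r, ((logistics_items.zip keys).filter (fun p => p.2 == r)).map Prod.fst))

-- ===== PRECONDITION & SPEC =====
def Spec_group_shipments_by_region_py (logistics_items : List (List (String × List (String × String)))) (out : List (String × List (List (String × List (String × String))))) : Prop := out = group_shipments_by_region_py_alt logistics_items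
instance (logistics_items : List (List (String × List (String × String)))) (out : List (String × List (List (String × List (String × String))))) : Decidable (Spec_group_shipments_by_region_py logistics_items out) := by
  unfold Spec_group_shipments_by_region_py
  have h1 : DecidableEq (List (String × List (String × String))) := inferInstance
  have h2 : DecidableEq (List (List (String × List (String × String)))) := inferInstance
  infer_instance

-- ===== CLAIM (what is proved, stated in full; the proofs are below) =====
def Claim_equal_group_shipments_by_region_py : Prop := ∀ (logistics_items : List (List (String × List (String × String)))), Dom_group_shipments_by_region_py logistics_items → Spec_group_shipments_by_region_py logistics_items (group_shipments_by_region_py logistics_items)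

-- ===== LEMMAS AND PROOFS =====

-- A's loop body is exactly "modify at the region key with default []".
theorem pvStep_eq (d : PySem.Dict String (List (List (String × List (String × String)))))
    (r : String) (item : List (String × List (String × String))) :
    (let d' := if d.contains r then d else d.insert r []
     d'.modify r [] (fun l => l ++ [item]))
      = d.modify r [] (fun l => l ++ [item]) := by
  by_cases h : d.contains r
  · simp [h]
  · simp only [h, Bool.false_eq_true, if_false]
    simp [PySem.Dict.modify, PySem.Dict.getD_insert_self,
      PySem.Dict.insert_insert_self, PySem.Dict.getD_of_not_contains _ _ (by simpa using h)]

theorem group_shipments_by_region_py_spec : Claim_equal_group_shipments_by_region_py := by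
  intro items _
  unfold Spec_group_shipments_by_region_py
  unfold group_shipments_by_region_py group_shipments_by_region_py_alt
  have hfold : items.foldl (fun regional_shipments item =>
      let data := PySem.Dict.getD (PySem.Dict.mk item) "data" []
      let destination := PySem.Dict.getD (PySem.Dict.mk data) "field4" ""
      let region := if destination ≠ "" then
          PySem.Str.strip (PySem.List.pyGetD ((PySem.Str.split? destination ",").getD []) (-1) "")
        else "Unknown"
      let regional_shipments :=
        if regional_shipments.contains region then regional_shipments
        else regional_shipments.insert region []
      regional_shipments.modify region [] (fun l => l ++ [item])) PySem.Dict.empty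
      = items.foldl (fun d x => d.modify (pvRegion x) [] (fun l => l ++ [x])) PySem.Dict.empty := by
    congr 1
    funext d x
    exact pvStep_eq d (pvRegion x) x
  rw [hfold]
  set d := items.foldl (fun d x => d.modify (pvRegion x) [] (fun l => l ++ [x])) PySem.Dict.empty with hd
  have hnd : d.keys.Nodup := by
    rw [hd]
    exact PySem.Dict.nodup_keys_foldl_modify_key items pvRegion [] (fun _ x l => l ++ [x]) _
      (by simp)
  have hkeys : d.keys = PySem.List.dedup (items.map pvRegion) := by
    rw [hd, PySem.Dict.keys_foldl_modify_key items pvRegion [] (fun _ x l => l ++ [x]),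
      PySem.List.dedup_eq_ofList]
    rfl
  have hget : ∀ r, d.getD r [] =
      ((items.zip (items.map pvRegion)).filter (fun p => p.2 == r)).map Prod.fst := by
    intro r
    have hmap : items.foldl (fun d x => d.modify (pvRegion x) [] (fun l => l ++ [x]))
        PySem.Dict.empty
        = (items.map (fun x => (pvRegion x, x))).foldl
            (fun d p => d.modify p.1 [] (fun l => l ++ [p.2])) PySem.Dict.empty := by
      rw [List.foldl_map]
    rw [hd, hmap, PySem.Dict.getD_foldl_modify_append]
    simp only [PySem.Dict.getD_empty, List.nil_append, List.filter_map, List.map_map]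
    have hz : items.zip (items.map pvRegion) = items.map (fun x => (x, pvRegion x)) := by
      exact Eq.symm List.map_prod_left_eq_zip
    rw [hz, List.filter_map, List.map_map]
    rfl
  rw [PySem.Dict.items_eq_map_keys d hnd [], hkeys]
  apply List.map_congr_left
  intro r _
  rw [hget r]
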